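-- pv_equiv track=rewrite | github.com/stepbystepcode/AI-class | 3-Uncertainty/2-Resolution.py | split_args
-- ===== SOURCE A (Python) =====
-- def split_args(args_str):
--     args = []
--     current = ""
--     depth = 0
--     for char in args_str:
--         if char == ',' and depth == 0:
--             args.append(current.strip())
--             current = ""
--         else:
--             if char == '(':
--                 depth += 1
--             elif char == ')':
--                 depth -= 1
--             current += char
--     if current:
--         args.append(current.strip())
--     return args
-- ===== SOURCE B (Python) =====
-- def split_args(args_str):
--     # Pass 1: record the index of every comma at parenthesis depth 0.
--     depth = 0
--     cuts = []
--     for i, ch in enumerate(args_str):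
--         if ch == ',' and depth == 0:
--             cuts.append(i)
--         elif ch == '(':
--             depth += 1
--         elif ch == ')':
--             depth -= 1
--     # Pass 2: slice the raw segments out of args_str between consecutive cuts.
--     raw = []
--     start = 0
--     for c in cuts:
--         raw.append(args_str[start:c])
--         start = c + 1
--     raw.append(args_str[start:])
--     # Pass 3: strip; the final segment is kept only if its raw text is non-empty.
--     out = [seg.strip() for seg in raw[:-1]]
--     if raw[-1]:
--         out.append(raw[-1].strip())
--     return out
-- ===== Notes on version B (the rewrite author's own statement) =====
-- stated objective: alternative
-- what changed: Replaced A's single character-accumulating loop (growing a current-string and appending on each top-level comma) by a three-pass cut-index design: one scan records the indices of depth-0 commas, a second phase slices the raw segments out of args_str between consecutive cuts, and a final phase strips them (keeping the last segment only if its raw text is non-empty).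
import Mathlib
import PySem

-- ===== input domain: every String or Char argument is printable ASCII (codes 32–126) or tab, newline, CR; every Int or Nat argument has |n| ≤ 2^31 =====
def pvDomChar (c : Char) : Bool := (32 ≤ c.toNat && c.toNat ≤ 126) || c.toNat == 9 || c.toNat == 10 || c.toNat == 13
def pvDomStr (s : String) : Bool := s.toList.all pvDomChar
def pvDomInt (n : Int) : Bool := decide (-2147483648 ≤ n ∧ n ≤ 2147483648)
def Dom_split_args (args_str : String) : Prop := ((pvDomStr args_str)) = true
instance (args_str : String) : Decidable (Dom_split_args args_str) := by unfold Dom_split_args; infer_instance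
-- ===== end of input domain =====

-- B replaces A's single character-accumulating loop by three passes (record depth-0 comma indices, slice raw segments between cuts, strip); objective: alternative decomposition, same cost.

-- ===== PORT A =====
-- one step of A's character loop: state = (args, current, depth)
def pvStepA (st : List String × List Char × Int) (c : Char) : List String × List Char × Int :=
  let (args, current, depth) := st
  if c = ',' ∧ depth = 0 then
    (args ++ [String.ofList (PySem.Chars.strip current)], [], depth)
  else
    (args, current ++ [c], if c = '(' then depth + 1 else if c = ')' then depth - 1 else depth)

def split_args (args_str : String) : List String :=
  let st := args_str.toList.foldl pvStepA ([], [], 0)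
  if st.2.1 ≠ [] then st.1 ++ [String.ofList (PySem.Chars.strip st.2.1)] else st.1

-- ===== PORT B =====
-- pass-1 step: state = (depth, cuts); record the index of every comma at depth 0
def pvStepCut (st : Int × List Int) (p : Int × Char) : Int × List Int :=
  let (depth, cuts) := st
  if p.2 = ',' ∧ depth = 0 then (depth, cuts ++ [p.1])
  else if p.2 = '(' then (depth + 1, cuts)
  else if p.2 = ')' then (depth - 1, cuts)
  else (depth, cuts)

-- pass-2 step: state = (raw, start); slice args_str between consecutive cuts
def pvStepSlice (s : List Char) (st : List (List Char) × Int) (c : Int) : List (List Char) × Int :=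
  (st.1 ++ [PySem.List.slice s (some st.2) (some c)], c + 1)

def split_args_alt (args_str : String) : List String :=
  let s := args_str.toList
  let cuts := ((PySem.List.enumerate s 0).foldl pvStepCut (0, [])).2
  let st := cuts.foldl (pvStepSlice s) ([], 0)
  let raw := st.1 ++ [PySem.List.slice s (some st.2) none]
  let out := raw.dropLast.map (fun seg => String.ofList (PySem.Chars.strip seg))
  if raw.getLast! ≠ [] then out ++ [String.ofList (PySem.Chars.strip raw.getLast!)] else out

-- ===== PRECONDITION & SPEC =====
def Spec_split_args (args_str : String) (out : List String) : Prop := out = split_args_alt args_str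
instance (args_str : String) (out : List String) : Decidable (Spec_split_args args_str out) := by unfold Spec_split_args; infer_instance

-- ===== CLAIM (what is proved, stated in full; the proofs are below) =====
def Claim_equal_split_args : Prop := ∀ (args_str : String), Dom_split_args args_str → Spec_split_args args_str (split_args args_str)

-- ===== LEMMAS AND PROOFS =====

-- raw segments of cs between depth-0 commas (last segment may be empty)
def pvSplitRaw : List Char → Int → List (List Char)
  | [], _ => [[]]
  | c :: cs, d =>
    if c = ',' ∧ d = 0 then [] :: pvSplitRaw cs d
    else
      match pvSplitRaw cs (if c = '(' then d + 1 else if c = ')' then d - 1 else d) with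
      | [] => [[c]]
      | s :: rest => (c :: s) :: rest

def pvMapHead (f : List Char → List Char) : List (List Char) → List (List Char)
  | [] => []
  | s :: rest => f s :: rest

-- strip every segment; keep the last only if its raw text is non-empty
def pvFinalize (segs : List (List Char)) : List String :=
  segs.dropLast.map (fun s => String.ofList (PySem.Chars.strip s)) ++
    (if segs.getLast! ≠ [] then [String.ofList (PySem.Chars.strip segs.getLast!)] else [])

-- indices (counted from i) of the depth-0 commas of cs
def pvCuts : List Char → Int → Nat → List Nat
  | [], _, _ => []
  | c :: cs, d, i =>
    if c = ',' ∧ d = 0 then i :: pvCuts cs d (i + 1)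
    else pvCuts cs (if c = '(' then d + 1 else if c = ')' then d - 1 else d) (i + 1)

-- slices of s from position start, cut at the given indices
def pvRawF (s : List Char) : Nat → List Nat → List (List Char)
  | start, [] => [PySem.List.slice s (some (start : Int)) none]
  | start, c :: cl => PySem.List.slice s (some (start : Int)) (some (c : Int)) :: pvRawF s (c + 1) cl

theorem pvSplitRaw_ne_nil (cs : List Char) (d : Int) : pvSplitRaw cs d ≠ [] := by
  cases cs with
  | nil => simp [pvSplitRaw]
  | cons c cs =>
    rw [pvSplitRaw]
    split
    · simp
    · split <;> simp

theorem pvFinalize_cons (x : List Char) (l : List (List Char)) (h : l ≠ []) :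
    pvFinalize (x :: l) = String.ofList (PySem.Chars.strip x) :: pvFinalize l := by
  cases l with
  | nil => exact absurd rfl h
  | cons y t => simp [pvFinalize, List.getLast!]

theorem pvMapHead_nil_append (l : List (List Char)) : pvMapHead (fun s => [] ++ s) l = l := by
  cases l <;> simp [pvMapHead]

-- A's loop computes: args ++ finalize of the raw segments (with current glued onto the first)
theorem pvA_loop (cs : List Char) : ∀ (args : List String) (cur : List Char) (d : Int),
    (if (cs.foldl pvStepA (args, cur, d)).2.1 ≠ [] then
       (cs.foldl pvStepA (args, cur, d)).1 ++ [String.ofList (PySem.Chars.strip (cs.foldl pvStepA (args, cur, d)).2.1)]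
     else (cs.foldl pvStepA (args, cur, d)).1)
      = args ++ pvFinalize (pvMapHead (fun s => cur ++ s) (pvSplitRaw cs d)) := by
  induction cs with
  | nil =>
    intro args cur d
    simp only [List.foldl_nil, pvSplitRaw, pvMapHead, pvFinalize]
    by_cases h : cur = [] <;> simp [h, List.getLast!]
  | cons c cs ih =>
    intro args cur d
    rw [pvSplitRaw]
    simp only [List.foldl_cons, pvStepA]
    by_cases hc : c = ',' ∧ d = 0
    · simp only [if_pos hc]
      rw [ih]
      rw [pvMapHead_nil_append]
      have hne := pvSplitRaw_ne_nil cs d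
      cases hsr : pvSplitRaw cs d with
      | nil => exact absurd hsr hne
      | cons s rest =>
        simp only [pvMapHead]
        rw [pvFinalize_cons (cur ++ []) (s :: rest) (by simp)]
        simp
    · simp only [if_neg hc]
      rw [ih]
      have hne := pvSplitRaw_ne_nil cs (if c = '(' then d + 1 else if c = ')' then d - 1 else d)
      cases hsr : pvSplitRaw cs (if c = '(' then d + 1 else if c = ')' then d - 1 else d) with
      | nil => exact absurd hsr hne
      | cons s rest => simp [pvMapHead]

-- B's pass-1 fold computes pvCuts
theorem pvB_cuts (cs : List Char) : ∀ (d : Int) (acc : List Int) (i : Nat),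
    ((PySem.List.enumerate cs (i : Int)).foldl pvStepCut (d, acc)).2
      = acc ++ List.map (Nat.cast : Nat → Int) (pvCuts cs d i) := by
  induction cs with
  | nil => intro d acc i; simp [PySem.List.enumerate_nil, pvCuts]
  | cons c cs ih =>
    intro d acc i
    rw [PySem.List.enumerate_cons]
    have hcast : ((i : Int) + 1) = ((i + 1 : Nat) : Int) := by push_cast; ring
    simp only [List.foldl_cons, pvStepCut, pvCuts]
    by_cases hc : c = ',' ∧ d = 0
    · simp only [if_pos hc, hcast]
      rw [ih]
      simp
    · simp only [if_neg hc, hcast]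
      by_cases hp : c = '('
      · simp only [if_pos hp]
        rw [ih]
      · simp only [if_neg hp]
        by_cases hq : c = ')'
        · simp only [if_pos hq]; rw [ih]
        · simp only [if_neg hq]; rw [ih]

-- B's pass-2 fold computes pvRawF
theorem pvB_raw (s : List Char) (cl : List Nat) : ∀ (acc : List (List Char)) (start : Nat),
    (((List.map (Nat.cast : Nat → Int) cl).foldl (pvStepSlice s) (acc, (start : Int))).1
      ++ [PySem.List.slice s (some (((List.map (Nat.cast : Nat → Int) cl).foldl (pvStepSlice s) (acc, (start : Int))).2)) none])
      = acc ++ pvRawF s start cl := by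
  induction cl with
  | nil => intro acc start; simp [pvRawF]
  | cons c cl ih =>
    intro acc start
    rw [List.map_cons, List.foldl_cons]
    show ((List.map (Nat.cast : Nat → Int) cl).foldl (pvStepSlice s)
          (acc ++ [PySem.List.slice s (some (start:Int)) (some (c:Int))], (c:Int) + 1)).1
        ++ [PySem.List.slice s (some (((List.map (Nat.cast : Nat → Int) cl).foldl (pvStepSlice s)
          (acc ++ [PySem.List.slice s (some (start:Int)) (some (c:Int))], (c:Int) + 1)).2)) none]
      = acc ++ pvRawF s start (c :: cl)
    have hcast : ((c : Int) + 1) = ((c + 1 : Nat) : Int) := by push_cast; ring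
    rw [hcast, ih]
    simp [pvRawF]

theorem pvCuts_ge (cs : List Char) : ∀ (d : Int) (i : Nat), ∀ x ∈ pvCuts cs d i, i ≤ x := by
  induction cs with
  | nil => intro d i x hx; simp [pvCuts] at hx
  | cons c cs ih =>
    intro d i x hx
    rw [pvCuts] at hx
    split at hx
    · rcases List.mem_cons.mp hx with h | h
      · omega
      · have := ih _ (i + 1) x h; omega
    · have := ih _ (i + 1) x hx; omega

theorem pvDropOne (s : List Char) (i : Nat) (c : Char) (cs : List Char)
    (hdrop : s.drop i = c :: cs) : s.drop (i + 1) = cs := by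
  have h1 : List.drop 1 (List.drop i s) = List.drop (i + 1) s := by
    rw [List.drop_drop, Nat.add_comm]
  rw [← h1, hdrop]
  rfl

-- shifting pvRawF's start across one character prepends it to the first segment
theorem pvRawF_shift (s : List Char) (c : Char) (cs : List Char) (i : Nat)
    (hdrop : s.drop i = c :: cs) (cl : List Nat) (hge : ∀ x ∈ cl, i + 1 ≤ x) :
    pvRawF s i cl = (match pvRawF s (i + 1) cl with
      | [] => [[c]]
      | h :: t => (c :: h) :: t) := by
  cases cl with
  | nil =>
    simp only [pvRawF, PySem.List.slice_from_natCast, hdrop, pvDropOne s i c cs hdrop]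
  | cons x cl =>
    have hx : i + 1 ≤ x := hge x (List.mem_cons_self ..)
    simp only [pvRawF, PySem.List.slice_natCast, hdrop, pvDropOne s i c cs hdrop]
    have h1 : x - i = (x - (i + 1)) + 1 := by omega
    rw [h1, List.take_succ_cons]

-- the sliced segments are exactly the raw segments
theorem pvRaw_eq_splitRaw (cs : List Char) : ∀ (d : Int) (i : Nat) (s : List Char),
    s.drop i = cs → pvRawF s i (pvCuts cs d i) = pvSplitRaw cs d := by
  induction cs with
  | nil =>
    intro d i s hdrop
    simp [pvCuts, pvRawF, PySem.List.slice_from_natCast, hdrop, pvSplitRaw]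
  | cons c cs ih =>
    intro d i s hdrop
    have hd1 : s.drop (i + 1) = cs := pvDropOne s i c cs hdrop
    rw [pvCuts, pvSplitRaw]
    by_cases hc : c = ',' ∧ d = 0
    · simp only [if_pos hc]
      simp only [pvRawF, PySem.List.slice_natCast]
      rw [ih d (i + 1) s hd1]
      simp
    · simp only [if_neg hc]
      rw [pvRawF_shift s c cs i hdrop _ (pvCuts_ge cs _ (i + 1))]
      rw [ih _ (i + 1) s hd1]

theorem pvA_eq (args_str : String) :
    split_args args_str = pvFinalize (pvSplitRaw args_str.toList 0) := by
  have h := pvA_loop args_str.toList [] [] 0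
  rw [pvMapHead_nil_append] at h
  simp only [List.nil_append] at h
  exact h

theorem pvB_eq (args_str : String) :
    split_args_alt args_str = pvFinalize (pvSplitRaw args_str.toList 0) := by
  have hc := pvB_cuts args_str.toList 0 [] 0
  rw [Nat.cast_zero] at hc
  have hr := pvB_raw args_str.toList (pvCuts args_str.toList 0 0) [] 0
  rw [Nat.cast_zero] at hr
  simp only [List.nil_append] at hr hc
  show (if (((((PySem.List.enumerate args_str.toList 0).foldl pvStepCut (0, [])).2).foldl (pvStepSlice args_str.toList) ([], 0)).1
          ++ [PySem.List.slice args_str.toList (some (((((PySem.List.enumerate args_str.toList 0).foldl pvStepCut (0, [])).2).foldl (pvStepSlice args_str.toList) ([], 0)).2)) none]).getLast! ≠ [] then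
        ((((((PySem.List.enumerate args_str.toList 0).foldl pvStepCut (0, [])).2).foldl (pvStepSlice args_str.toList) ([], 0)).1
          ++ [PySem.List.slice args_str.toList (some (((((PySem.List.enumerate args_str.toList 0).foldl pvStepCut (0, [])).2).foldl (pvStepSlice args_str.toList) ([], 0)).2)) none]).dropLast.map (fun seg => String.ofList (PySem.Chars.strip seg)))
          ++ [String.ofList (PySem.Chars.strip (((((PySem.List.enumerate args_str.toList 0).foldl pvStepCut (0, [])).2).foldl (pvStepSlice args_str.toList) ([], 0)).1
          ++ [PySem.List.slice args_str.toList (some (((((PySem.List.enumerate args_str.toList 0).foldl pvStepCut (0, [])).2).foldl (pvStepSlice args_str.toList) ([], 0)).2)) none]).getLast!)]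
      else
        ((((((PySem.List.enumerate args_str.toList 0).foldl pvStepCut (0, [])).2).foldl (pvStepSlice args_str.toList) ([], 0)).1
          ++ [PySem.List.slice args_str.toList (some (((((PySem.List.enumerate args_str.toList 0).foldl pvStepCut (0, [])).2).foldl (pvStepSlice args_str.toList) ([], 0)).2)) none]).dropLast.map (fun seg => String.ofList (PySem.Chars.strip seg))))
      = pvFinalize (pvSplitRaw args_str.toList 0)
  rw [hc, hr, pvRaw_eq_splitRaw args_str.toList 0 0 args_str.toList (by simp)]
  unfold pvFinalize
  split_ifs <;> simp

-- ===== VERDICT (by name: the statement is the Claim_ definition above) =====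
theorem split_args_spec : Claim_equal_split_args := by
  intro args_str _
  unfold Spec_split_args
  rw [pvA_eq, pvB_eq]
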